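-- pv_equiv track=rewrite | github.com/XXXXiner/lumaa-spring-2025-ai-ml | recommend.py | extract_negated_genres
-- ===== SOURCE A (Python) =====
-- def extract_negated_genres(user_input):
--     """ Identifies words following 'not', 'don't', 'no', etc. """
--     words = user_input.lower().split()
--     negated_terms = []
--     negation = False
--
--     for word in words:
--         if word in ["not", "no", "don't", "doesn't", "isn't", "wasn't", "aren't", "weren't", "hasn't", "haven't"]:
--             negation = True
--         elif negation:
--             negated_terms.append(word)  # Capture negated genre
--             negation = False
--
--     return negated_terms
-- ===== SOURCE B (Python) =====
-- NEGATIONS = {"not", "no", "don't", "doesn't", "isn't", "wasn't", "aren't",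
--              "weren't", "hasn't", "haven't"}
--
--
-- def extract_negated_genres(user_input):
--     """ Identifies words following 'not', 'don't', 'no', etc. """
--     words = user_input.lower().split()
--     return [w for p, w in zip(words, words[1:])
--             if p in NEGATIONS and w not in NEGATIONS]
-- ===== Notes on version B (the rewrite author's own statement) =====
-- stated objective: simpler
-- what changed: Replaced the stateful flag-and-reset loop with a stateless single comprehension over adjacent word pairs (zip of the list with its tail), collecting a word when its predecessor is a negation term and it is not itself one.
import Mathlib
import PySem

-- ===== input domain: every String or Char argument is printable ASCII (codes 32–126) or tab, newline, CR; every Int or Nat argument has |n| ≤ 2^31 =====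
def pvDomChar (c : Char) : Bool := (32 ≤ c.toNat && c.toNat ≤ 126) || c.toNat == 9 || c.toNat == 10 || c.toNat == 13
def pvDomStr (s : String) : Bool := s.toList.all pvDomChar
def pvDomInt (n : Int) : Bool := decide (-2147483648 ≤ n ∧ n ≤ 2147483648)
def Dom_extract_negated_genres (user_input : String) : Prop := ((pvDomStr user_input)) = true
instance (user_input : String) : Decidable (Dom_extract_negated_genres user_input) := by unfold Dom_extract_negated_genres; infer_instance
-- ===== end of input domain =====

-- B replaces A's stateful flag-and-reset loop with a stateless comprehension over
-- adjacent word pairs (simpler decomposition, same O(n) cost; return value only).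

-- ===== PORT A =====
-- the literal list A compares against in its first branch
def pvNegList : List String :=
  ["not", "no", "don't", "doesn't", "isn't", "wasn't", "aren't", "weren't", "hasn't", "haven't"]

def extract_negated_genres (user_input : String) : List String :=
  let words := PySem.Str.split₀ (PySem.Str.lower user_input)
  (words.foldl
    (fun (st : Bool × List String) word =>
      if word ∈ pvNegList then (true, st.2)
      else if st.1 then (false, st.2 ++ [word])
      else st)
    (false, [])).2

-- ===== PORT B =====
-- NEGATIONS = set literal of Source B (same ten distinct words)
def pvNegSet : PySem.Set String := PySem.Set.ofList pvNegList

def extract_negated_genres_alt (user_input : String) : List String :=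
  let words := PySem.Str.split₀ (PySem.Str.lower user_input)
  -- [w for p, w in zip(words, words[1:]) if p in NEGATIONS and w not in NEGATIONS]
  (words.zip (PySem.List.slice words (some 1) none)).filterMap
    (fun pw => if pw.1 ∈ pvNegSet ∧ pw.2 ∉ pvNegSet then some pw.2 else none)

-- ===== PRECONDITION & SPEC =====
def Spec_extract_negated_genres (user_input : String) (out : List String) : Prop := out = extract_negated_genres_alt user_input
instance (user_input : String) (out : List String) : Decidable (Spec_extract_negated_genres user_input out) := by unfold Spec_extract_negated_genres; infer_instance

-- ===== CLAIM (what is proved, stated in full; the proofs are below) =====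
def Claim_equal_extract_negated_genres : Prop := ∀ (user_input : String), Dom_extract_negated_genres user_input → Spec_extract_negated_genres user_input (extract_negated_genres user_input)

-- ===== LEMMAS AND PROOFS =====

-- common recursive characterisation: result of scanning ws with flag b = "previous word was a negation"
def pvSpec (b : Bool) : List String → List String
  | [] => []
  | w :: ws =>
      if w ∈ pvNegList then pvSpec true ws
      else if b then w :: pvSpec false ws
      else pvSpec false ws

theorem pvFoldA (ws : List String) : ∀ (b : Bool) (acc : List String),
    (ws.foldl
      (fun (st : Bool × List String) word =>
        if word ∈ pvNegList then (true, st.2)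
        else if st.1 then (false, st.2 ++ [word])
        else st)
      (b, acc)).2 = acc ++ pvSpec b ws := by
  induction ws with
  | nil => intro b acc; simp [pvSpec]
  | cons w ws ih =>
      intro b acc
      by_cases hw : w ∈ pvNegList
      · simp [pvSpec, hw, ih]
      · cases b
        · simp [pvSpec, hw, ih]
        · simp [pvSpec, hw, ih]

theorem pvZipB (ws : List String) : ∀ (p : String),
    ((p :: ws).zip ws).filterMap
      (fun pw => if pw.1 ∈ pvNegSet ∧ pw.2 ∉ pvNegSet then some pw.2 else none)
    = pvSpec (decide (p ∈ pvNegList)) ws := by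
  induction ws with
  | nil => intro p; simp [pvSpec]
  | cons v vs ih =>
      intro p
      have hpB : (p ∈ pvNegSet) ↔ (p ∈ pvNegList) := by unfold pvNegSet; exact PySem.Set.mem_ofList _ _
      have hvB : (v ∈ pvNegSet) ↔ (v ∈ pvNegList) := by unfold pvNegSet; exact PySem.Set.mem_ofList _ _
      by_cases hv : v ∈ pvNegList
      · by_cases hp : p ∈ pvNegList <;>
          simp [List.filterMap, pvSpec, hv, hp, hpB, hvB, ih]
      · by_cases hp : p ∈ pvNegList <;>
          simp [List.filterMap, pvSpec, hv, hp, hpB, hvB, ih]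

-- ===== VERDICT (by name: the statement is the Claim_ definition above) =====
theorem extract_negated_genres_spec : Claim_equal_extract_negated_genres := by
  intro user_input _
  unfold Spec_extract_negated_genres extract_negated_genres extract_negated_genres_alt
  cases hws : PySem.Str.split₀ (PySem.Str.lower user_input) with
  | nil => simp
  | cons w ws =>
      simp only [PySem.List.slice_from_one, List.tail_cons, pvFoldA, pvZipB]
      by_cases hw : w ∈ pvNegList <;> simp [pvSpec, hw]
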